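-- pv_equiv track=rewrite | github.com/connogle/comp110-22f-workspace | exercises/ex07/dictionary.py | count
-- ===== SOURCE A (Python) =====
-- def count(strings: list[str]) -> dict[str, int]:
--     """Places the items in a list of strings into a dictionary displaying their frequencies."""
--     result: dict[str, int] = {}
--     for string in strings:
--         if string in result:
--             result[string] += 1
--         else:
--             result[string] = 1
--     return result
-- ===== SOURCE B (Python) =====
-- def count(strings: list[str]) -> dict[str, int]:
--     """Places the items in a list of strings into a dictionary displaying their frequencies."""
--     return {s: strings.count(s) for s in dict.fromkeys(strings)}
-- ===== Notes on version B (the rewrite author's own statement) =====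
-- stated objective: simpler
-- what changed: Replaces the accumulating counter loop by a comprehension over the first-occurrence-deduplicated keys, each count obtained by a full rescan with strings.count.
import Mathlib
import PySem

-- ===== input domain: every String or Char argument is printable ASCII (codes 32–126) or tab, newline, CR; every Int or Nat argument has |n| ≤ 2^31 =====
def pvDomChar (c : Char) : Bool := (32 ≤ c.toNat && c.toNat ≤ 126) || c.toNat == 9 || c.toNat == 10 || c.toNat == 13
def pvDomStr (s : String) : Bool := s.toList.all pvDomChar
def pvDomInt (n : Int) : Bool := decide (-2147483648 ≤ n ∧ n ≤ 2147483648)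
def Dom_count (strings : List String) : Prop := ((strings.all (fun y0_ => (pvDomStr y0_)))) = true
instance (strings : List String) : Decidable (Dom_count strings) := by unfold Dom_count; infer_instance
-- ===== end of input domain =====

-- B replaces A's single accumulating pass by a dedup-then-rescan comprehension (simpler, not faster).

-- ===== PORT A =====
def count (strings : List String) : List (String × Int) :=
  (strings.foldl
    (fun result string =>
      if result.contains string then result.modify string 0 (· + 1)
      else result.insert string 1)
    PySem.Dict.empty).items

-- ===== PORT B =====
def count_alt (strings : List String) : List (String × Int) :=
  (PySem.List.dedup strings).map (fun s => (s, (PySem.List.count strings s : Int)))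

-- ===== PRECONDITION & SPEC =====
def Spec_count (strings : List String) (out : List (String × Int)) : Prop := out = count_alt strings
instance (strings : List String) (out : List (String × Int)) : Decidable (Spec_count strings out) := by unfold Spec_count; infer_instance

-- ===== CLAIM (what is proved, stated in full; the proofs are below) =====
def Claim_equal_count : Prop := ∀ (strings : List String), Dom_count strings → Spec_count strings (count strings)

-- ===== LEMMAS AND PROOFS =====

theorem count_step_eq_modify (d : PySem.Dict String Int) (s : String) :
    (if d.contains s then d.modify s 0 (· + 1) else d.insert s 1) = d.modify s 0 (· + 1) := by
  by_cases h : d.contains s = true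
  · simp [h]
  · simp only [h]
    unfold PySem.Dict.modify
    rw [PySem.Dict.getD_of_not_contains]
    · norm_num
    · simpa using h

-- ===== VERDICT (by name: the statement is the Claim_ definition above) =====
theorem count_spec : Claim_equal_count := by
  intro strings _
  show count strings = count_alt strings
  unfold count count_alt
  have : (fun (result : PySem.Dict String Int) string =>
      if result.contains string then result.modify string 0 (· + 1)
      else result.insert string 1) = fun result string => result.modify string 0 (· + 1) := by
    funext d s; exact count_step_eq_modify d s
  rw [this, ← PySem.Dict.counter_eq_foldl, PySem.Dict.items_counter,
    ← PySem.List.dedup_eq_ofList]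
  simp [PySem.List.count_eq]
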